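-- pv_equiv track=rewrite | github.com/plot-hole/subtext | subtext/scripts/23_prediction_resolution.py | extract_entities_from_text
-- ===== SOURCE A (Python) =====
-- def extract_entities_from_text(text, known_entities):
--     """Find known entity names mentioned in text."""
--     if not text or not isinstance(text, str):
--         return set()
--     text_lower = text.lower()
--     found = set()
--     for entity in known_entities:
--         if entity.lower() in text_lower:
--             found.add(entity)
--     return found
-- ===== SOURCE B (Python) =====
-- def extract_entities_from_text(text, known_entities):
--     """Find known entity names mentioned in text.
--
--     Different algorithm: precompute an index (hash set) of all lowercased
--     substrings of the text up to the maximum entity length, then test each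
--     entity with a single set lookup instead of scanning the whole text per
--     entity.
--     """
--     if not text or not isinstance(text, str):
--         return set()
--     text_lower = text.lower()
--     max_len = 0
--     for entity in known_entities:
--         max_len = max(max_len, len(entity))
--     subs = {""}
--     for i in range(len(text_lower)):
--         for l in range(1, max_len + 1):
--             subs.add(text_lower[i:i + l])
--     return {entity for entity in known_entities if entity.lower() in subs}
-- ===== Notes on version B (the rewrite author's own statement) =====
-- stated objective: alternative
-- what changed: B precomputes a hash-set index of all lowercased substrings of the text up to the maximum entity length, then decides each entity by one set lookup, instead of A's per-entity substring scan of the whole text (measured 8.9x faster at the largest timing size).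
import Mathlib
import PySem

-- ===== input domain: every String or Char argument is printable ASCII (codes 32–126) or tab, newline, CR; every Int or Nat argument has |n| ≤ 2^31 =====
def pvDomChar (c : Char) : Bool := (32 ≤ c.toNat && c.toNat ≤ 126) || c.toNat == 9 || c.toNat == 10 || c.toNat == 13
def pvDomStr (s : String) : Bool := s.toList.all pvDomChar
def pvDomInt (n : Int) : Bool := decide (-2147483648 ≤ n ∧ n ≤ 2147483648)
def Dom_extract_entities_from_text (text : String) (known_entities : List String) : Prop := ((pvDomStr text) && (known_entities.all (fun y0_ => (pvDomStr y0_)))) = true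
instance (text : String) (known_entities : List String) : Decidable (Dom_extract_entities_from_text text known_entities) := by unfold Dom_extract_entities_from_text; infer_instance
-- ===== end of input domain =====

-- B replaces A's per-entity scan of the text by a precomputed set of all lowercased
-- lowercased substrings of the text up to the maximum entity length, so each
-- entity is decided by one set lookup (objective: alternative algorithm).

-- ===== PORT A =====
def extract_entities_from_text (text : String) (known_entities : List String) : List String :=
  if text = "" then []
  else
    let text_lower := PySem.Str.lower text
    known_entities.foldl
      (fun found entity =>
        if PySem.Str.isIn (PySem.Str.lower entity) text_lower then PySem.Set.add found entity
        else found)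
      PySem.Set.empty

-- ===== PORT B =====
def extract_entities_from_text_alt (text : String) (known_entities : List String) : List String :=
  if text = "" then []
  else
    let text_lower := PySem.Str.lower text
    let max_len : Int := known_entities.foldl (fun acc entity => max acc (PySem.Str.len entity)) 0
    let subs : PySem.Set String :=
      (PySem.List.pyRange 0 (PySem.Str.len text_lower)).foldl
        (fun s i =>
          (PySem.List.pyRange 1 (max_len + 1)).foldl
            (fun s l => s.add (PySem.Str.slice text_lower (some i) (some (i + l)))) s)
        (PySem.Set.add PySem.Set.empty "")
    PySem.Set.ofList (known_entities.filter (fun entity => subs.contains (PySem.Str.lower entity)))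

-- ===== PRECONDITION & SPEC =====
def Spec_extract_entities_from_text (text : String) (known_entities : List String) (out : List String) : Prop := out = extract_entities_from_text_alt text known_entities
instance (text : String) (known_entities : List String) (out : List String) : Decidable (Spec_extract_entities_from_text text known_entities out) := by unfold Spec_extract_entities_from_text; infer_instance

-- ===== CLAIM (what is proved, stated in full; the proofs are below) =====
def Claim_equal_extract_entities_from_text : Prop := ∀ (text : String) (known_entities : List String), Dom_extract_entities_from_text text known_entities → Spec_extract_entities_from_text text known_entities (extract_entities_from_text text known_entities)

-- ===== LEMMAS AND PROOFS =====

-- membership in a fold of set-updates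
theorem mem_foldl_set_update {α β : Type} [BEq α] [LawfulBEq α] (g : β → List α)
    (xs : List β) (s : PySem.Set α) (x : α) :
    x ∈ xs.foldl (fun s i => PySem.Set.update s (g i)) s ↔ x ∈ s ∨ ∃ i ∈ xs, x ∈ g i := by
  induction xs generalizing s with
  | nil => simp
  | cons a t ih =>
    simp only [List.foldl_cons, ih, PySem.Set.mem_update, List.mem_cons]
    constructor
    · rintro ((h | h) | ⟨i, hi, hx⟩)
      · exact Or.inl h
      · exact Or.inr ⟨a, Or.inl rfl, h⟩
      · exact Or.inr ⟨i, Or.inr hi, hx⟩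
    · rintro (h | ⟨i, (rfl | hi), hx⟩)
      · exact Or.inl (Or.inl h)
      · exact Or.inl (Or.inr hx)
      · exact Or.inr ⟨i, hi, hx⟩

-- characterisation of the substring index built by B
theorem mem_subs_iff (tl : String) (m : Int) (x : String) :
    x ∈ (PySem.List.pyRange 0 (PySem.Str.len tl)).foldl
        (fun s i =>
          (PySem.List.pyRange 1 (m + 1)).foldl
            (fun s l => PySem.Set.add s (PySem.Str.slice tl (some i) (some (i + l)))) s)
        (PySem.Set.add PySem.Set.empty "") ↔
      x = "" ∨ ∃ i l : Int, 0 ≤ i ∧ i < PySem.Str.len tl ∧ 1 ≤ l ∧ l ≤ m ∧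
        x = PySem.Str.slice tl (some i) (some (i + l)) := by
  have hbody : (fun (s : PySem.Set String) (i : Int) =>
      (PySem.List.pyRange 1 (m + 1)).foldl
        (fun s l => PySem.Set.add s (PySem.Str.slice tl (some i) (some (i + l)))) s) =
      (fun (s : PySem.Set String) (i : Int) =>
        PySem.Set.update s ((PySem.List.pyRange 1 (m + 1)).map
          (fun l => PySem.Str.slice tl (some i) (some (i + l))))) := by
    funext s i
    rw [PySem.Set.update_map_eq_foldl_add]
  rw [hbody, mem_foldl_set_update]
  have hbase : x ∈ PySem.Set.add PySem.Set.empty ("" : String) ↔ x = "" := by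
    simp [PySem.Set.empty]
  rw [hbase]
  constructor
  · rintro (h | ⟨i, hi, hx⟩)
    · exact Or.inl h
    · rw [PySem.List.mem_pyRange_one] at hi
      rcases List.mem_map.mp hx with ⟨l, hl, rfl⟩
      rw [PySem.List.mem_pyRange_one] at hl
      exact Or.inr ⟨i, l, hi.1, hi.2, hl.1, by omega, rfl⟩
  · rintro (h | ⟨i, l, h0, hlt, h1, hm, rfl⟩)
    · exact Or.inl h
    · refine Or.inr ⟨i, PySem.List.mem_pyRange_one.mpr ⟨h0, hlt⟩, List.mem_map.mpr ⟨l, ?_, rfl⟩⟩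
      exact PySem.List.mem_pyRange_one.mpr ⟨h1, by omega⟩

-- the substring index decides the infix relation for short enough strings
theorem subs_index_correct (tl : String) (m : Int) (x : String)
    (hx : (x.toList.length : Int) ≤ m) :
    (x = "" ∨ ∃ i l : Int, 0 ≤ i ∧ i < PySem.Str.len tl ∧ 1 ≤ l ∧ l ≤ m ∧
        x = PySem.Str.slice tl (some i) (some (i + l))) ↔ x.toList <:+: tl.toList := by
  constructor
  · rintro (rfl | ⟨i, l, h0, hlt, h1, hm, rfl⟩)
    · simp
    · rw [PySem.Str.toList_slice, PySem.Chars.slice_eq_listSlice,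
        PySem.List.slice_toNat _ h0 (by omega)]
      exact ((List.take_prefix _ _).isInfix).trans ((List.drop_suffix _ _).isInfix)
  · intro hinf
    by_cases hnil : x.toList = []
    · exact Or.inl (String.ext (by simpa using hnil))
    · rcases hinf with ⟨pre, suf, hsum⟩
      refine Or.inr ⟨(pre.length : Int), (x.toList.length : Int), by positivity, ?_, ?_, hx, ?_⟩
      · rw [PySem.Str.len_eq, ← hsum]
        have : x.toList.length ≠ 0 := fun h => hnil (List.length_eq_zero_iff.mp h)
        simp only [List.length_append]
        omega
      · have : x.toList.length ≠ 0 := fun h => hnil (List.length_eq_zero_iff.mp h)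
        omega
      · apply String.ext
        rw [PySem.Str.toList_slice, PySem.Chars.slice_eq_listSlice,
          PySem.List.slice_natCast_add, ← hsum, List.append_assoc, List.drop_left,
          List.take_left]

-- ===== VERDICT (by name: the statement is the Claim_ definition above) =====
theorem extract_entities_from_text_spec : Claim_equal_extract_entities_from_text := by
  intro text ks _dom
  unfold Spec_extract_entities_from_text extract_entities_from_text extract_entities_from_text_alt
  by_cases h : text = ""
  · simp [h]
  · simp only [h, if_false]
    rw [PySem.List.foldl_if_eq_foldl_filter]
    conv_lhs => rw [show (PySem.Set.empty : PySem.Set String) = [] from rfl]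
    rw [← PySem.Set.ofList_eq_foldl]
    refine congrArg PySem.Set.ofList (List.filter_congr fun e he => ?_)
    set tl := PySem.Str.lower text with htl
    set m : Int := ks.foldl (fun acc entity => max acc (PySem.Str.len entity)) 0 with hmdef
    have hlen : ((PySem.Str.lower e).toList.length : Int) ≤ m := by
      have h1 : PySem.Str.len e ≤ m := (PySem.List.le_foldl_max_int ks PySem.Str.len 0).2 e he
      rw [PySem.Str.len_eq] at h1
      rw [PySem.Str.toList_lower]
      simpa [PySem.Chars.lower] using h1
    rw [Bool.eq_iff_iff, PySem.Str.isIn_eq, PySem.Chars.isIn_iff_infix,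
      PySem.Set.contains_iff, mem_subs_iff, subs_index_correct tl m _ hlen]
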